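-- pv_equiv track=rewrite | github.com/nikhilkr7/Astuto-coding-test | Folder/q1.py | first_stable_character
-- ===== SOURCE A (Python) =====
-- def first_stable_character(s: str):
--     """
--     Return the first character in `s` whose occurrences form one contiguous block,
--     and appears at least twice. Otherwise return None.
--     """
--     n = len(s)
--     i = 0
--
--     while i < n:
--         ch = s[i]
--         j = i
--
--         # Expand the block of contiguous same characters
--         while j < n and s[j] == ch:
--             j += 1
--
--         # Now block is s[i:j] for character ch
--         block_length = j - i
--
--         # Condition 1: must appear at least twice
--         if block_length >= 2:
--             # Condition 2: must not appear outside this block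
--             if s.count(ch) == block_length:
--                 return ch
--
--         i = j
--
--     return None
-- ===== SOURCE B (Python) =====
-- def first_stable_character(s: str):
--     # One pass: count occurrences and mark characters whose occurrences are
--     # split into more than one contiguous run; then pick the first qualifying
--     # character in first-occurrence order.
--     count = {}
--     broken = set()
--     prev = None
--     for ch in s:
--         if ch in count:
--             count[ch] += 1
--             if prev != ch:
--                 broken.add(ch)
--         else:
--             count[ch] = 1
--         prev = ch
--     for ch, c in count.items():
--         if c >= 2 and ch not in broken:
--             return ch
--     return None
-- ===== Notes on version B (the rewrite author's own statement) =====
-- stated objective: alternative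
-- what changed: A expands runs with a nested while-loop and calls s.count(ch) inside the loop; B makes a single pass recording per-character count and a broken-run flag, then returns the first recorded character with count >= 2 and an unbroken run.
import Mathlib
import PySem

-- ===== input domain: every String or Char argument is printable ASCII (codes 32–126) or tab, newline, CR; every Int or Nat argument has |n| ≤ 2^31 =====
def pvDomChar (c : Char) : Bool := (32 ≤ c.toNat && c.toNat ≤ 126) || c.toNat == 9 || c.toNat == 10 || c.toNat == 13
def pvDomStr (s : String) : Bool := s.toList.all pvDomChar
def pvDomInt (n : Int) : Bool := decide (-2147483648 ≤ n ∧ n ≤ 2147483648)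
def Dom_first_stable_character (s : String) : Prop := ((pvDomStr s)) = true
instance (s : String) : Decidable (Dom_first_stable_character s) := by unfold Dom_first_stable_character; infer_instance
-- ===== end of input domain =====

-- B replaces A's block-expansion scan by a single left-to-right pass maintaining per-character
-- counts and a broken-run set, then one selection pass over the table in first-occurrence order
-- (a different algorithm of comparable cost).

-- ===== PORT A =====
-- Outer while-loop: structural recursion on the remaining suffix (i = j jumps past the block);
-- the inner 'while j < n and s[j] == ch' is the takeWhile/dropWhile split of that suffix.
-- s.count(ch) for a 1-character ch is exactly the character count List.count (exact here).
def pvBlockLoop (full : List Char) : List Char → Option Char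
  | [] => none
  | c :: rest =>
    let blen := ((c :: rest).takeWhile (· == c)).length
    if 2 ≤ blen then
      if full.count c = blen then some c
      else pvBlockLoop full ((c :: rest).dropWhile (· == c))
    else pvBlockLoop full ((c :: rest).dropWhile (· == c))
  termination_by l => l.length
  decreasing_by
    all_goals
      simp only [List.dropWhile_cons, beq_self_eq_true, if_true]
      exact Nat.lt_succ_of_le (List.length_dropWhile_le _ _)

def first_stable_character (s : String) : Option String :=
  (pvBlockLoop s.toList s.toList).map (fun c => String.ofList [c])

-- ===== PORT B =====
-- One step of B's single pass: state = (count dict, broken-run set, previous char).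
def pvStepB (st : PySem.Dict Char Int × PySem.Set Char × Option Char) (ch : Char) :
    PySem.Dict Char Int × PySem.Set Char × Option Char :=
  match st with
  | (cnt, br, prev) =>
    if cnt.contains ch then
      (cnt.modify ch 0 (· + 1), if prev ≠ some ch then PySem.Set.add br ch else br, some ch)
    else
      (cnt.insert ch 1, br, some ch)

def first_stable_character_alt (s : String) : Option String :=
  let fin := s.toList.foldl pvStepB (PySem.Dict.empty, PySem.Set.empty, none)
  (fin.1.items.find? (fun p => decide (2 ≤ p.2) && !(PySem.Set.contains fin.2.1 p.1))).map
    (fun p => String.ofList [p.1])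

-- ===== PRECONDITION & SPEC =====
def Spec_first_stable_character (s : String) (out : Option String) : Prop := out = first_stable_character_alt s
instance (s : String) (out : Option String) : Decidable (Spec_first_stable_character s out) := by unfold Spec_first_stable_character; infer_instance

-- ===== CLAIM (what is proved, stated in full; the proofs are below) =====
def Claim_equal_first_stable_character : Prop := ∀ (s : String), Dom_first_stable_character s → Spec_first_stable_character s (first_stable_character s)

-- ===== LEMMAS AND PROOFS =====

-- `pvBroken t c = true` iff the occurrences of c in t are NOT one contiguous block
-- (c occurs again after its first run of c's ends).
def pvBroken (t : List Char) (c : Char) : Bool :=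
  ((t.dropWhile (· != c)).dropWhile (· == c)).contains c

-- the selection predicate both programs agree on
def pvQual (full : List Char) (c : Char) : Bool :=
  decide (2 ≤ full.count c) && !pvBroken full c

theorem pvBroken_nil (c : Char) : pvBroken [] c = false := rfl

-- how pvBroken evolves when one character is appended
theorem pvBroken_append (t : List Char) (a c : Char) :
    pvBroken (t ++ [a]) c = true ↔
      pvBroken t c = true ∨ (a = c ∧ c ∈ t ∧ t.getLast? ≠ some c) := by
  unfold pvBroken
  rw [List.dropWhile_append]
  by_cases h1 : (List.dropWhile (· != c) t).isEmpty
  · have h0 : List.dropWhile (· != c) t = [] := List.isEmpty_iff.mp h1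
    have hct : c ∉ t := by
      intro hc
      have := List.dropWhile_eq_nil_iff.mp h0 c hc
      simp at this
    rw [if_pos h1, h0]
    by_cases hac : a = c
    · subst hac; simp [List.dropWhile, hct]
    · have hb : (a != c) = true := by simp [hac]
      simp [List.dropWhile, hb, hct]
  · rw [if_neg h1]
    have hD1ne : List.dropWhile (· != c) t ≠ [] := by
      intro h; rw [h] at h1; simp at h1
    obtain ⟨h, s, hD⟩ : ∃ h s, List.dropWhile (· != c) t = h :: s := by
      cases hE : List.dropWhile (· != c) t with
      | nil => exact absurd hE hD1ne
      | cons x xs => exact ⟨x, xs, rfl⟩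
    have hh : h = c := by
      have hm := List.head?_dropWhile_not (· != c) t
      rw [hD] at hm
      simpa using hm
    have hct : c ∈ t := by
      have : h ∈ List.dropWhile (· != c) t := by rw [hD]; exact List.mem_cons_self
      have := (List.dropWhile_sublist (l := t) (· != c)).mem this
      rwa [hh] at this
    have hsplit : t.takeWhile (· != c) ++ List.dropWhile (· != c) t = t :=
      List.takeWhile_append_dropWhile
    rw [List.dropWhile_append]
    by_cases h2 : ((List.dropWhile (· != c) t).dropWhile (· == c)).isEmpty
    · have hR0 : (List.dropWhile (· != c) t).dropWhile (· == c) = [] := List.isEmpty_iff.mp h2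
      have hallc : ∀ x ∈ List.dropWhile (· != c) t, x = c := by
        intro x hx
        have := List.dropWhile_eq_nil_iff.mp hR0 x hx
        simpa using this
      have hlast : t.getLast? = some c := by
        obtain ⟨d, hd⟩ : ∃ d, (List.dropWhile (· != c) t).getLast? = some d := by
          cases hE : (List.dropWhile (· != c) t).getLast? with
          | none => exact absurd (List.getLast?_eq_none_iff.mp hE) hD1ne
          | some d => exact ⟨d, rfl⟩
        have hdc : d = c := hallc d (List.mem_of_getLast? hd)
        rw [← hsplit, List.getLast?_append, hd, hdc]
        rfl
      rw [if_pos h2, hR0]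
      by_cases hac : a = c
      · subst hac; simp [List.dropWhile, hlast]
      · have hb : (a == c) = false := by simp [hac]
        simp [List.dropWhile, hb, hlast]
        exact fun hca => hac hca.symm
    · have hRne : (List.dropWhile (· != c) t).dropWhile (· == c) ≠ [] := by
        intro h; rw [h] at h2; simp at h2
      have hsplit2 : (List.dropWhile (· != c) t).takeWhile (· == c) ++
          (List.dropWhile (· != c) t).dropWhile (· == c) = List.dropWhile (· != c) t :=
        List.takeWhile_append_dropWhile
      rw [if_neg h2]
      obtain ⟨d, hd⟩ : ∃ d, ((List.dropWhile (· != c) t).dropWhile (· == c)).getLast? = some d := by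
        cases hE : ((List.dropWhile (· != c) t).dropWhile (· == c)).getLast? with
        | none => exact absurd (List.getLast?_eq_none_iff.mp hE) hRne
        | some d => exact ⟨d, rfl⟩
      have hDlast : (List.dropWhile (· != c) t).getLast? = some d := by
        conv_lhs => rw [← hsplit2]
        rw [List.getLast?_append, hd]; rfl
      have hlastR : t.getLast? = some d := by
        conv_lhs => rw [← hsplit]
        rw [List.getLast?_append, hDlast]; rfl
      constructor
      · intro hL
        rcases (by simpa [List.contains_iff_mem, List.mem_append] using hL :
            c ∈ (List.dropWhile (· != c) t).dropWhile (· == c) ∨ c = a) with hcR | hca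
        · exact Or.inl (by simpa [List.contains_iff_mem] using hcR)
        · by_cases hcR : c ∈ (List.dropWhile (· != c) t).dropWhile (· == c)
          · exact Or.inl (by simpa [List.contains_iff_mem] using hcR)
          · refine Or.inr ⟨hca.symm, hct, ?_⟩
            intro hlc
            rw [hlastR] at hlc
            have hdc : d = c := Option.some.inj hlc
            have hm := List.mem_of_getLast? hd
            rw [hdc] at hm
            exact hcR hm
      · intro hR
        rcases hR with hbr | ⟨hac, _, _⟩
        · have : c ∈ (List.dropWhile (· != c) t).dropWhile (· == c) :=
            List.contains_iff_mem.mp hbr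
          simp [List.mem_append, this]
        · simp [List.mem_append, hac]

-- ordered dedup of a snoc
theorem pvDedup_append (t : List Char) (a : Char) :
    PySem.List.dedup (t++[a]) = if a ∈ t then PySem.List.dedup t else PySem.List.dedup t ++ [a] := by
  simp only [PySem.List.dedup_eq_ofList, PySem.Set.ofList_eq_foldl, List.foldl_append,
    List.foldl_cons, List.foldl_nil]
  by_cases ha : a ∈ t <;>
    simp [PySem.Set.add, PySem.Set.contains, ← PySem.Set.ofList_eq_foldl, PySem.Set.mem_ofList, ha]

-- fold invariant for B's single pass
theorem pvFold_inv (t : List Char) :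
    (t.foldl pvStepB (PySem.Dict.empty, PySem.Set.empty, none)).1.keys = PySem.List.dedup t ∧
    (∀ c, (t.foldl pvStepB (PySem.Dict.empty, PySem.Set.empty, none)).1.getD c 0 = (t.count c : Int)) ∧
    (∀ c, c ∈ (t.foldl pvStepB (PySem.Dict.empty, PySem.Set.empty, none)).2.1 ↔ pvBroken t c = true) ∧
    (t.foldl pvStepB (PySem.Dict.empty, PySem.Set.empty, none)).2.2 = t.getLast? := by
  induction t using List.reverseRecOn with
  | nil =>
    refine ⟨rfl, fun c => rfl, fun c => ?_, rfl⟩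
    simp [PySem.Set.empty, pvBroken_nil]
  | append_singleton t a ih =>
    obtain ⟨ih1, ih2, ih3, ih4⟩ := ih
    rw [List.foldl_append] at *
    simp only [List.foldl_cons, List.foldl_nil]
    by_cases ha : a ∈ t
    · have hcont : (t.foldl pvStepB (PySem.Dict.empty, PySem.Set.empty, none)).1.contains a = true := by
        rw [PySem.Dict.contains_iff_mem_keys, ih1, PySem.List.dedup_eq_ofList, PySem.Set.mem_ofList]
        exact ha
      rw [pvStepB, hcont]
      simp only [if_true]
      refine ⟨?_, fun c => ?_, fun c => ?_, ?_⟩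
      · rw [PySem.Dict.keys_modify, PySem.Dict.keys_insert_of_contains _ _ hcont, ih1,
          pvDedup_append, if_pos ha]
      · rw [PySem.Dict.getD_modify, ih2 a]
        by_cases hc : c = a
        · subst hc; simp [List.count_append]
        · rw [if_neg hc, ih2 c]
          simp [List.count_append, List.count_singleton]
          intro h; exact absurd h.symm hc
      · rw [pvBroken_append]
        by_cases hprev : (t.foldl pvStepB (PySem.Dict.empty, PySem.Set.empty, none)).2.2 = some a
        · rw [if_neg (by simpa using hprev)]
          rw [ih3 c]
          rw [ih4] at hprev
          constructor
          · exact Or.inl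
          · rintro (hb | ⟨hac, _, hlast⟩)
            · exact hb
            · exact absurd (hac ▸ hprev) hlast
        · rw [if_pos (by simpa using hprev)]
          rw [PySem.Set.mem_add, ih3 c]
          rw [ih4] at hprev
          constructor
          · rintro (hb | hca)
            · exact Or.inl hb
            · exact Or.inr ⟨hca.symm, hca ▸ ha, hca ▸ hprev⟩
          · rintro (hb | ⟨hac, _, _⟩)
            · exact Or.inl hb
            · exact Or.inr hac.symm
      · rw [List.getLast?_concat]
    · have hcont : (t.foldl pvStepB (PySem.Dict.empty, PySem.Set.empty, none)).1.contains a = false := by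
        rw [← Bool.not_eq_true, PySem.Dict.contains_iff_mem_keys, ih1, PySem.List.dedup_eq_ofList,
          PySem.Set.mem_ofList]
        exact ha
      rw [pvStepB, hcont]
      simp only [Bool.false_eq_true, if_false]
      refine ⟨?_, fun c => ?_, fun c => ?_, ?_⟩
      · rw [PySem.Dict.keys_insert_of_not_contains _ _ hcont, ih1, pvDedup_append, if_neg ha]
      · rw [PySem.Dict.getD_insert]
        by_cases hc : c = a
        · subst hc
          rw [if_pos rfl]
          have : t.count c = 0 := List.count_eq_zero.mpr ha
          simp [List.count_append, this]
        · rw [if_neg hc, ih2 c]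
          simp [List.count_append, List.count_singleton]
          intro h; exact absurd h.symm hc
      · rw [pvBroken_append, ih3 c]
        constructor
        · exact Or.inl
        · rintro (hb | ⟨hac, hct, _⟩)
          · exact hb
          · exact absurd (hac ▸ hct) ha
      · rw [List.getLast?_concat]

-- if c occurs in `pre` but not at its end, and again at the head of `l`, its run is broken
theorem pvBroken_of_pre (pre l : List Char) (c : Char)
    (hc : c ∈ pre) (hlast : pre.getLast? ≠ some c) (hhead : l.head? = some c) :
    pvBroken (pre ++ l) c = true := by
  unfold pvBroken
  have hDne : List.dropWhile (· != c) pre ≠ [] := by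
    intro h
    have := List.dropWhile_eq_nil_iff.mp h c hc
    simp at this
  rw [List.dropWhile_append, if_neg (by simpa using hDne)]
  have hsplit : pre.takeWhile (· != c) ++ List.dropWhile (· != c) pre = pre :=
    List.takeWhile_append_dropWhile
  have hRne : (List.dropWhile (· != c) pre).dropWhile (· == c) ≠ [] := by
    intro hR0
    have hallc : ∀ x ∈ List.dropWhile (· != c) pre, x = c := by
      intro x hx
      have := List.dropWhile_eq_nil_iff.mp hR0 x hx
      simpa using this
    obtain ⟨d, hd⟩ : ∃ d, (List.dropWhile (· != c) pre).getLast? = some d := by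
      cases hE : (List.dropWhile (· != c) pre).getLast? with
      | none => exact absurd (List.getLast?_eq_none_iff.mp hE) hDne
      | some d => exact ⟨d, rfl⟩
    apply hlast
    conv_lhs => rw [← hsplit]
    rw [List.getLast?_append, hd, hallc d (List.mem_of_getLast? hd)]
    rfl
  rw [List.dropWhile_append, if_neg (by simpa using hRne)]
  have : c ∈ l := by
    cases l with
    | nil => simp at hhead
    | cons x xs =>
      have hx : x = c := by simpa using hhead
      exact hx ▸ List.mem_cons_self
  simp [List.mem_append, this]

-- broken-ness of a run decomposition reduces to occurrence in the tail
theorem pvBroken_decomp (pre block rest' : List Char) (c : Char)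
    (hpre : c ∉ pre) (hbne : block ≠ []) (hbc : ∀ x ∈ block, x = c)
    (hrh : ∀ d, rest'.head? = some d → d ≠ c) :
    pvBroken (pre ++ block ++ rest') c = rest'.contains c := by
  unfold pvBroken
  have hpre0 : List.dropWhile (· != c) pre = [] :=
    List.dropWhile_eq_nil_iff.mpr (fun x hx => by
      simp only [bne_iff_ne, ne_eq]
      intro h; exact hpre (h ▸ hx))
  rw [List.append_assoc, List.dropWhile_append, if_pos (by simp [hpre0])]
  obtain ⟨b, bs, hb⟩ : ∃ b bs, block = b :: bs := by
    cases block with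
    | nil => exact absurd rfl hbne
    | cons b bs => exact ⟨b, bs, rfl⟩
  have hbcEq : b = c := hbc b (hb ▸ List.mem_cons_self)
  have hblock0 : List.dropWhile (· != c) (block ++ rest') = block ++ rest' := by
    rw [hb, List.cons_append, List.dropWhile_cons, if_neg (by simp [hbcEq])]
  rw [hblock0]
  have hblockdrop : List.dropWhile (· == c) (block ++ rest') = rest' := by
    rw [List.dropWhile_append, if_pos]
    · cases hr : rest' with
      | nil => simp
      | cons d ds =>
        rw [List.dropWhile_cons, if_neg]
        simp only [beq_iff_eq]
        exact hrh d (by rw [hr]; rfl)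
    · simp [List.dropWhile_eq_nil_iff]
      intro x hx
      simp [hbc x hx]
  rw [hblockdrop]

-- A's block scan computes the first character of the string satisfying pvQual
theorem pvBlockLoop_eq_find (full : List Char) :
    ∀ l pre, full = pre ++ l → (∀ c, l.head? = some c → pre.getLast? ≠ some c) →
      pvBlockLoop full l = l.find? (pvQual full) := by
  suffices H : ∀ n (l pre : List Char), l.length ≤ n → full = pre ++ l →
      (∀ c, l.head? = some c → pre.getLast? ≠ some c) →
      pvBlockLoop full l = l.find? (pvQual full) by
    exact fun l pre h1 h2 => H l.length l pre le_rfl h1 h2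
  intro n
  induction n with
  | zero =>
    intro l pre hl h1 h2
    rw [List.length_eq_zero_iff.mp (Nat.le_zero.mp hl)]
    simp [pvBlockLoop]
  | succ n ihn =>
    intro l pre hl h1 h2
    cases l with
    | nil => simp [pvBlockLoop]
    | cons c rest =>
      have hboundary : pre.getLast? ≠ some c := h2 c rfl
      set block := (c :: rest).takeWhile (· == c) with hblockdef
      set rest' := (c :: rest).dropWhile (· == c) with hrestdef
      have hsplit : block ++ rest' = c :: rest := List.takeWhile_append_dropWhile
      have hbc : ∀ x ∈ block, x = c := fun x hx => by
        simpa using List.mem_takeWhile_imp hx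
      have hbne : block ≠ [] := by
        rw [hblockdef, List.takeWhile_cons, if_pos (by simp)]
        simp
      have hrh : ∀ d, rest'.head? = some d → d ≠ c := by
        intro d hd
        have hm := List.head?_dropWhile_not (· == c) (c :: rest)
        rw [← hrestdef, hd] at hm
        simpa using hm
      have hfull2 : full = (pre ++ block) ++ rest' := by
        rw [h1, ← hsplit]; simp [List.append_assoc]
      have hcountblock : block.count c = block.length := by
        rw [List.count_eq_length]
        intro b hb; simpa using (hbc b hb).symm
      -- the block condition is equivalent to the selection predicate at c
      have hqual : pvQual full c = true ↔ (2 ≤ block.length ∧ full.count c = block.length) := by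
        constructor
        · intro hq
          obtain ⟨hcnt, hnb⟩ : 2 ≤ full.count c ∧ pvBroken full c = false := by
            unfold pvQual at hq
            simp only [Bool.and_eq_true, decide_eq_true_eq, Bool.not_eq_true'] at hq
            exact hq
          have hpre : c ∉ pre := by
            intro hc
            rw [h1, pvBroken_of_pre pre (c :: rest) c hc hboundary rfl] at hnb
            exact absurd hnb (by simp)
          have hnb2 : rest'.contains c = false := by
            rw [hfull2] at hnb
            rw [← pvBroken_decomp pre block rest' c hpre hbne hbc hrh]
            exact hnb
          have hrest0 : rest'.count c = 0 := by
            rw [List.count_eq_zero]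
            intro hc
            rw [List.contains_iff_mem.mpr hc] at hnb2
            exact absurd hnb2 (by simp)
          have hpre0 : pre.count c = 0 := List.count_eq_zero.mpr hpre
          have hcnteq : full.count c = block.length := by
            rw [hfull2, List.count_append, List.count_append, hpre0, hrest0, hcountblock]
            omega
          exact ⟨hcnteq ▸ hcnt, hcnteq⟩
        · rintro ⟨hlen, hcnt⟩
          have hcnteq : pre.count c + block.count c + rest'.count c = full.count c := by
            rw [hfull2, List.count_append, List.count_append]
          have hpre0 : pre.count c = 0 ∧ rest'.count c = 0 := by
            rw [hcnt, hcountblock] at hcnteq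
            omega
          have hpre : c ∉ pre := List.count_eq_zero.mp hpre0.1
          have hrest : c ∉ rest' := List.count_eq_zero.mp hpre0.2
          have hnb : pvBroken full c = false := by
            rw [hfull2, pvBroken_decomp pre block rest' c hpre hbne hbc hrh]
            simp [hrest]
          unfold pvQual
          simp only [Bool.and_eq_true, decide_eq_true_eq, Bool.not_eq_true']
          exact ⟨by omega, hnb⟩
      by_cases hcnd : 2 ≤ block.length ∧ full.count c = block.length
      · rw [pvBlockLoop]
        simp only [← hblockdef, if_pos hcnd.1, if_pos hcnd.2]
        rw [List.find?_cons_of_pos (hqual.mpr hcnd)]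
      · have hqf : pvQual full c = false := by
          rw [← Bool.not_eq_true]
          exact fun hq => hcnd (hqual.mp hq)
        have hLHS : pvBlockLoop full (c :: rest) = pvBlockLoop full rest' := by
          rw [pvBlockLoop]
          simp only [← hblockdef, ← hrestdef]
          by_cases hb2 : 2 ≤ block.length
          · rw [if_pos hb2, if_neg (fun hcc => hcnd ⟨hb2, hcc⟩)]
          · rw [if_neg hb2]
        rw [hLHS]
        have hskip : block.find? (pvQual full) = none := by
          rw [List.find?_eq_none]
          intro x hx
          rw [hbc x hx, hqf]
          simp
        have hfind : (c :: rest).find? (pvQual full) = rest'.find? (pvQual full) := by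
          rw [← hsplit, List.find?_append, hskip, Option.none_or]
        rw [hfind]
        have hlen' : rest'.length ≤ n := by
          have h1' : rest'.length < (c :: rest).length := by
            rw [hrestdef, List.dropWhile_cons, if_pos (by simp)]
            exact Nat.lt_succ_of_le (List.length_dropWhile_le _ _)
          omega
        apply ihn rest' (pre ++ block) hlen' (by rw [hfull2])
        intro d hd
        rw [List.getLast?_append]
        have hbl : block.getLast? = some c := by
          cases hE : block.getLast? with
          | none => exact absurd (List.getLast?_eq_none_iff.mp hE) hbne
          | some d' => rw [hbc d' (List.mem_of_getLast? hE)]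
        rw [hbl]
        intro hEq
        simp at hEq
        exact hrh d hd hEq.symm

-- find? sees through ordered dedup (the predicate depends only on the value)
theorem find?_dedup (p : Char → Bool) (l : List Char) :
    (PySem.List.dedup l).find? p = l.find? p := by
  induction l using List.reverseRecOn with
  | nil => rfl
  | append_singleton t a ih =>
    rw [pvDedup_append, List.find?_append]
    by_cases ha : a ∈ t
    · rw [if_pos ha, ih]
      cases hf : t.find? p with
      | some x => simp
      | none =>
        have hpa : p a = false := by
          have := List.find?_eq_none.mp hf a ha
          simpa using this
        simp [List.find?, hpa]
    · rw [if_neg ha, List.find?_append, ih]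

-- ===== VERDICT (by name: the statement is the Claim_ definition above) =====
theorem first_stable_character_spec : Claim_equal_first_stable_character := by
  unfold Claim_equal_first_stable_character
  intro s _
  unfold Spec_first_stable_character first_stable_character first_stable_character_alt
  obtain ⟨h1, h2, h3, h4⟩ := pvFold_inv s.toList
  have hnodup : (s.toList.foldl pvStepB (PySem.Dict.empty, PySem.Set.empty, none)).1.keys.Nodup := by
    rw [h1]; exact PySem.List.nodup_dedup _
  rw [pvBlockLoop_eq_find s.toList s.toList [] (by simp) (by simp)]
  simp only [PySem.Dict.items_eq_map_keys _ hnodup 0, List.find?_map, h1, find?_dedup]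
  have hfun : ((fun p : Char × Int =>
        decide (2 ≤ p.2) &&
          !(PySem.Set.contains (s.toList.foldl pvStepB (PySem.Dict.empty, PySem.Set.empty, none)).2.1 p.1)) ∘
      (fun k => (k, (s.toList.foldl pvStepB (PySem.Dict.empty, PySem.Set.empty, none)).1.getD k 0))) =
      pvQual s.toList := by
    funext k
    simp only [Function.comp_apply]
    rw [h2 k]
    unfold pvQual
    congr 1
    · exact decide_eq_decide.mpr (by exact_mod_cast Iff.rfl)
    · congr 1
      have hk2 : PySem.Set.contains
            (s.toList.foldl pvStepB (PySem.Dict.empty, PySem.Set.empty, none)).2.1 k = true ↔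
          pvBroken s.toList k = true :=
        (PySem.Set.contains_iff _ k).trans (h3 k)
      cases hbb : pvBroken s.toList k with
      | true => exact hk2.mpr hbb
      | false =>
        exact Bool.eq_false_iff.mpr (fun hcon => by
          have hcb := hk2.mp hcon
          rw [hbb] at hcb
          cases hcb)
  rw [hfun]
  cases hf : s.toList.find? (pvQual s.toList) with
  | none => simp
  | some c => simp
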